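-- pv_equiv track=rewrite | github.com/Patrycja1311/Codewars | kata_7kyu/barista_problem/barista_problem.py | barista
-- ===== SOURCE A (Python) =====
-- def barista(coffees):
--     total = time = 0
--     for i, c in enumerate(sorted(coffees)):
--         time += c
--         total += time
--         if i < len(coffees)-1:
--             time += 2
--     return total
-- ===== SOURCE B (Python) =====
-- def barista(coffees):
--     s = sorted(coffees)
--     n = len(s)
--     return sum(c * (n - i) for i, c in enumerate(s)) + n * (n - 1)
-- ===== Notes on version B (the rewrite author's own statement) =====
-- stated objective: simpler
-- what changed: Replaces A's loop threading running (total, time) accumulators with the +2 branch by a closed-form weighted sum over the sorted list: each element weighted by n-i, plus n*(n-1) for the accumulated +2 bonuses.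
import Mathlib
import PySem

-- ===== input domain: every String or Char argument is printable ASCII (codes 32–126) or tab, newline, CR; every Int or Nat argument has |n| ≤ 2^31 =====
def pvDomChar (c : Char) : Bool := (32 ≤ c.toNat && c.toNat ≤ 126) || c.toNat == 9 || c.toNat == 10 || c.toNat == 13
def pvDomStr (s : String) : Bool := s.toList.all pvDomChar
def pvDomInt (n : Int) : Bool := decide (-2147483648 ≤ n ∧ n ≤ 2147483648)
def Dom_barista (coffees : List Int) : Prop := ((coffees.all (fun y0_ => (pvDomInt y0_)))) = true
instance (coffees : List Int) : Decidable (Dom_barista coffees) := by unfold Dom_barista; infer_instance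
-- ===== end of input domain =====

-- B replaces A's threaded (total, time) accumulator with a closed-form weighted sum over the sorted list (objective: simpler).

-- ===== PORT A =====
-- literal port: fold over enumerate(sorted(coffees)) threading (total, time)
def barista (coffees : List Int) : Int :=
  ((PySem.List.enumerate (PySem.List.sorted coffees (fun x => x) false) 0).foldl
    (fun (st : Int × Int) (p : Int × Int) =>
      let time := st.2 + p.2
      let total := st.1 + time
      (total, if p.1 < (coffees.length : Int) - 1 then time + 2 else time))
    (0, 0)).1

-- ===== PORT B =====
def barista_alt (coffees : List Int) : Int :=
  let s := PySem.List.sorted coffees (fun x => x) false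
  let n : Int := s.length
  ((PySem.List.enumerate s 0).map (fun p => p.2 * (n - p.1))).sum + n * (n - 1)

-- ===== PRECONDITION & SPEC =====
def Spec_barista (coffees : List Int) (out : Int) : Prop := out = barista_alt coffees
instance (coffees : List Int) (out : Int) : Decidable (Spec_barista coffees out) := by unfold Spec_barista; infer_instance

-- ===== CLAIM (what is proved, stated in full; the proofs are below) =====
def Claim_equal_barista : Prop := ∀ (coffees : List Int), Dom_barista coffees → Spec_barista coffees (barista coffees)

-- ===== LEMMAS AND PROOFS =====

/-- recursive weighted sum: head gets weight = list length -/
def pvW : List Int → Int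
  | [] => 0
  | c :: r => c * ((r.length : Int) + 1) + pvW r

lemma pvW_map_sum (l : List Int) : ∀ (n s0 : Int), s0 + l.length = n →
    ((PySem.List.enumerate l s0).map (fun p => p.2 * (n - p.1))).sum = pvW l := by
  induction l with
  | nil => intro n s0 _; simp [PySem.List.enumerate_nil, pvW]
  | cons c r ih =>
      intro n s0 h
      rw [PySem.List.enumerate_cons]
      simp only [List.map_cons, List.sum_cons, pvW]
      rw [ih n (s0 + 1) (by simp only [List.length_cons] at h ⊢; push_cast at h ⊢; omega)]
      have : n - s0 = (r.length : Int) + 1 := by simp only [List.length_cons] at h; push_cast at h; omega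
      rw [this]

lemma pvLoop (l : List Int) : ∀ (n s0 total time : Int), s0 + l.length = n →
    ((PySem.List.enumerate l s0).foldl
      (fun (st : Int × Int) (p : Int × Int) =>
        let time := st.2 + p.2
        let total := st.1 + time
        (total, if p.1 < n - 1 then time + 2 else time))
      (total, time)).1
    = total + l.length * time + pvW l + l.length * (l.length - 1) := by
  induction l with
  | nil => intro n s0 total time _; simp [PySem.List.enumerate_nil, pvW]
  | cons c r ih =>
      intro n s0 total time h
      rw [PySem.List.enumerate_cons]
      simp only [List.foldl_cons]
      cases r with
      | nil =>
          have hc : ¬ (s0 < n - 1) := by simp only [List.length_cons, List.length_nil] at h; push_cast at h; omega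
          simp only [hc, if_false]
          simp [PySem.List.enumerate_nil, pvW]
          ring
      | cons d r' =>
          have hc : s0 < n - 1 := by simp only [List.length_cons] at h; push_cast at h; omega
          simp only [hc, if_true]
          rw [ih n (s0 + 1) (total + (time + c)) (time + c + 2)
              (by simp only [List.length_cons] at h ⊢; push_cast at h ⊢; omega)]
          simp only [pvW, List.length_cons]
          push_cast
          ring

-- ===== VERDICT (by name: the statement is the Claim_ definition above) =====
theorem barista_spec : Claim_equal_barista := by
  intro coffees _
  unfold Spec_barista barista barista_alt
  dsimp only
  have hlen : (PySem.List.sorted coffees (fun x => x) false).length = coffees.length :=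
    PySem.List.length_sorted ..
  set s := PySem.List.sorted coffees (fun x => x) false with hs
  rw [pvLoop s (coffees.length : Int) 0 0 0 (by rw [hlen]; ring),
      pvW_map_sum s (s.length : Int) 0 (by ring)]
  rw [hlen]
  ring
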